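-- pv_equiv track=rewrite | github.com/K4H3NY4/social-tracker | app.py | count_tiktok_content
-- ===== SOURCE A (Python) =====
-- def count_tiktok_content(posts: list) -> dict:
--     video_count = 0
--     image_count = 0
--
--     for post in posts:
--         raw_type = post.get('post_type', '').strip().lower()
--
--         if raw_type in ['video', 'videos', 'vid', 'vids']:
--             video_count += 1
--         elif raw_type in ['image', 'images', 'photo', 'photos', 'picture']:
--             image_count += 1
--         else:
--             video_count += 1
--
--     return {
--         'videos': video_count,
--         'images': image_count,
--         'total': video_count + image_count
--     }
-- ===== SOURCE B (Python) =====
-- IMAGE_TYPES = ('image', 'images', 'photo', 'photos', 'picture')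
--
--
-- def count_tiktok_content(posts: list) -> dict:
--     # Phase 1: build a frequency table of normalized post types.
--     freq = {}
--     for post in posts:
--         t = post.get('post_type', '').strip().lower()
--         freq[t] = freq.get(t, 0) + 1
--     # Phase 2: query the histogram for the image buckets only.
--     image_count = 0
--     for t in IMAGE_TYPES:
--         image_count += freq.get(t, 0)
--     total = len(posts)
--     return {
--         'videos': total - image_count,
--         'images': image_count,
--         'total': total,
--     }
-- ===== Notes on version B (the rewrite author's own statement) =====
-- stated objective: alternative
-- what changed: B builds a histogram (dict) of normalized post_type values in one phase, then derives image_count by five histogram lookups and video_count by subtraction from len(posts), instead of A's per-post classification into two running counters with a default-to-video else branch.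
import Mathlib
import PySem

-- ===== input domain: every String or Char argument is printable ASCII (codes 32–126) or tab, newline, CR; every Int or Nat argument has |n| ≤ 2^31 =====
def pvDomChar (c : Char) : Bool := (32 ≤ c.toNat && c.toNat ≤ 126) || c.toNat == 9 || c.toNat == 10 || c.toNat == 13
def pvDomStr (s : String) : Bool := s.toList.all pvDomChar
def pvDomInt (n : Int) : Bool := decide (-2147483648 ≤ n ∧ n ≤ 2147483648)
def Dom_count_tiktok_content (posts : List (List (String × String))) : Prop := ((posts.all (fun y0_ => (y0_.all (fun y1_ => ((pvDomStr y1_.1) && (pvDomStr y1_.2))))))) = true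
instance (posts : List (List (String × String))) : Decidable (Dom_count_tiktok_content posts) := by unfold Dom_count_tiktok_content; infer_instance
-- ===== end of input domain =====

-- B builds a histogram of normalized post_type values, then derives image_count from five
-- histogram lookups and video_count by subtraction from len(posts); objective: alternative.

-- shared normalization: post.get('post_type', '').strip().lower() (identical expression in both Pythons)
def pvRawType (post : List (String × String)) : String :=
  PySem.Str.lower (PySem.Str.strip ((PySem.Dict.mk post).getD "post_type" ""))

-- ===== PORT A =====
def count_tiktok_content (posts : List (List (String × String))) : List (String × Int) :=
  let st := posts.foldl (fun (acc : Int × Int) post =>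
    let raw := pvRawType post
    if raw ∈ ["video", "videos", "vid", "vids"] then (acc.1 + 1, acc.2)
    else if raw ∈ ["image", "images", "photo", "photos", "picture"] then (acc.1, acc.2 + 1)
    else (acc.1 + 1, acc.2)) (0, 0)
  [("videos", st.1), ("images", st.2), ("total", st.1 + st.2)]

-- ===== PORT B =====
def pvImageTypes : List String := ["image", "images", "photo", "photos", "picture"]

-- Phase 1 of B: the histogram freq[t] = freq.get(t, 0) + 1
def pvFreq (posts : List (List (String × String))) : PySem.Dict String Int :=
  posts.foldl (fun d post => let t := pvRawType post; d.insert t (d.getD t 0 + 1))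
    PySem.Dict.empty

def count_tiktok_content_alt (posts : List (List (String × String))) : List (String × Int) :=
  let freq := pvFreq posts
  -- Phase 2: five histogram lookups
  let image_count : Int := pvImageTypes.foldl (fun s t => s + freq.getD t 0) 0
  let total : Int := posts.length
  [("videos", total - image_count), ("images", image_count), ("total", total)]

-- ===== PRECONDITION & SPEC =====
def Spec_count_tiktok_content (posts : List (List (String × String))) (out : List (String × Int)) : Prop := out = count_tiktok_content_alt posts
instance (posts : List (List (String × String))) (out : List (String × Int)) : Decidable (Spec_count_tiktok_content posts out) := by unfold Spec_count_tiktok_content; infer_instance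

-- ===== CLAIM (what is proved, stated in full; the proofs are below) =====
def Claim_equal_count_tiktok_content : Prop := ∀ (posts : List (List (String × String))), Dom_count_tiktok_content posts → Spec_count_tiktok_content posts (count_tiktok_content posts)

-- ===== LEMMAS AND PROOFS =====

-- A's loop invariant: starting from acc, the fold adds the non-image count to acc.1
-- and the image count to acc.2.
theorem count_tiktok_fold_inv (f : List (String × String) → String)
    (posts : List (List (String × String))) (acc : Int × Int) :
    posts.foldl (fun (acc : Int × Int) post =>
      let raw := f post
      if raw ∈ ["video", "videos", "vid", "vids"] then (acc.1 + 1, acc.2)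
      else if raw ∈ ["image", "images", "photo", "photos", "picture"] then (acc.1, acc.2 + 1)
      else (acc.1 + 1, acc.2)) acc
    = (acc.1 + ((posts.length : Int) - (posts.countP (fun post => f post ∈ pvImageTypes) : Nat)),
       acc.2 + ((posts.countP (fun post => f post ∈ pvImageTypes) : Nat))) := by
  induction posts generalizing acc with
  | nil => simp
  | cons p rest ih =>
    rw [List.foldl_cons, ih]
    simp only [List.length_cons, List.countP_cons, pvImageTypes]
    by_cases hv : f p ∈ ["video", "videos", "vid", "vids"]
    · have hi : ¬ f p ∈ ["image", "images", "photo", "photos", "picture"] := by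
        simp only [List.mem_cons, List.not_mem_nil, or_false] at hv ⊢
        rcases hv with h | h | h | h <;> rw [h] <;> decide
      simp [hv, hi, Prod.mk.injEq]
      omega
    · by_cases hi : f p ∈ ["image", "images", "photo", "photos", "picture"]
      · simp [hv, hi, Prod.mk.injEq]
        omega
      · simp [hv, hi, Prod.mk.injEq]
        omega

-- B's phase-1 histogram characterisation: each bucket holds the count of its key.
theorem freq_getD_gen (f : List (String × String) → String)
    (posts : List (List (String × String))) (d : PySem.Dict String Int) (t : String) :
    (posts.foldl (fun d post => d.insert (f post) (d.getD (f post) 0 + 1)) d).getD t 0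
      = d.getD t 0 + ((posts.map f).count t : Nat) := by
  induction posts generalizing d with
  | nil => simp
  | cons p rest ih =>
    rw [List.foldl_cons, ih, PySem.Dict.getD_insert, List.map_cons, List.count_cons]
    by_cases h : t = f p
    · simp [h]
      ring
    · have h2 : ¬ f p = t := fun hh => h hh.symm
      simp [h, h2]

theorem freq_getD (posts : List (List (String × String))) (t : String) :
    (pvFreq posts).getD t 0 = ((posts.map pvRawType).count t : Nat) := by
  rw [pvFreq, freq_getD_gen pvRawType posts PySem.Dict.empty t, PySem.Dict.getD_empty]
  ring

-- Counting membership in k :: ks splits off the exact-match count of k when k ∉ ks.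
theorem countP_mem_cons (k : String) (ks : List String) (hk : k ∉ ks) (l : List String) :
    l.countP (fun x => x ∈ k :: ks) = l.count k + l.countP (fun x => x ∈ ks) := by
  induction l with
  | nil => simp
  | cons a l ihl =>
    rw [List.countP_cons, List.countP_cons, List.count_cons, ihl]
    by_cases ha : a = k
    · subst ha
      simp [List.mem_cons, hk]
      omega
    · simp [List.mem_cons, ha]
      split_ifs <;> omega

-- Summing disjoint exact-match counts over a Nodup key list equals counting membership.
theorem sum_count_eq_countP (ks : List String) (hnd : ks.Nodup) (l : List String) (s : Int) :
    ks.foldl (fun (s : Int) t => s + ((l.count t : Nat) : Int)) s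
      = s + (l.countP (fun x => x ∈ ks) : Nat) := by
  induction ks generalizing s with
  | nil => simp
  | cons k ks ih =>
    rcases List.nodup_cons.mp hnd with ⟨hk, hnd'⟩
    rw [List.foldl_cons, ih hnd', countP_mem_cons k ks hk l]
    push_cast
    ring

theorem pvImageTypes_nodup : pvImageTypes.Nodup := by
  simp [pvImageTypes]

-- ===== VERDICT (by name: the statement is the Claim_ definition above) =====
theorem count_tiktok_content_spec : Claim_equal_count_tiktok_content := by
  intro posts _
  unfold Spec_count_tiktok_content
  simp only [count_tiktok_content, count_tiktok_content_alt,
    count_tiktok_fold_inv pvRawType posts (0, 0)]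
  have hfun : (fun (s : Int) t => s + (pvFreq posts).getD t 0)
      = (fun (s : Int) t => s + (((posts.map pvRawType).count t : Nat) : Int)) := by
    funext s t
    rw [freq_getD]
  rw [hfun, sum_count_eq_countP pvImageTypes pvImageTypes_nodup (posts.map pvRawType) 0,
    List.countP_map]
  simp only [Function.comp_def]
  simp only [zero_add, List.cons.injEq, Prod.mk.injEq, true_and, and_true]
  omega
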